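-- pv_equiv track=rewrite | github.com/Ddilibe/alx-higher_level_programming | 0x03-python-data_structures/7-add_tuple.py | add_tuple
-- ===== SOURCE A (Python) =====
-- def add_tuple(tuple_a=(), tuple_b=()):
--     if len(tuple_a) == 1:
--         tuple_a = change_one(tuple_a)
--     if len(tuple_b) == 1:
--         tuple_b = change_one(tuple_b)
--     if len(tuple_a) == 0:
--         tuple_a = change_two(tuple_a)
--     if len(tuple_b) == 0:
--         tuple_b = change_two(tuple_b)
--     f = []
--     for i in range(0, 2):
--         f.append(tuple_a[i] + tuple_b[i])
--     return (tuple(f))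
--
-- def change_one(tupl):
--     tupl = list(tupl)
--     tupl.append(0)
--     tupl = tuple(tupl)
--     return (tupl)
--
-- def change_two(tupl):
--     tupl = list(tupl)
--     for i in range(0,2):
--         tupl.append(0)
--     tupl = tuple(tupl)
--     return (tupl)
-- ===== SOURCE B (Python) =====
-- def add_tuple(tuple_a=(), tuple_b=()):
--     sums = [0, 0]
--     for t in (tuple_a, tuple_b):
--         for i, x in enumerate(t[:2]):
--             sums[i] = sums[i] + x
--     return tuple(sums)
-- ===== Notes on version B (the rewrite author's own statement) =====
-- stated objective: alternative
-- what changed: No padding to length 2 anywhere: B starts from a pair accumulator initialised to zeros and folds the contributions of each tuple's first two elements (via enumerate over t[:2]) into it, so missing components simply contribute nothing instead of being materialised as zeros.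
import Mathlib
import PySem

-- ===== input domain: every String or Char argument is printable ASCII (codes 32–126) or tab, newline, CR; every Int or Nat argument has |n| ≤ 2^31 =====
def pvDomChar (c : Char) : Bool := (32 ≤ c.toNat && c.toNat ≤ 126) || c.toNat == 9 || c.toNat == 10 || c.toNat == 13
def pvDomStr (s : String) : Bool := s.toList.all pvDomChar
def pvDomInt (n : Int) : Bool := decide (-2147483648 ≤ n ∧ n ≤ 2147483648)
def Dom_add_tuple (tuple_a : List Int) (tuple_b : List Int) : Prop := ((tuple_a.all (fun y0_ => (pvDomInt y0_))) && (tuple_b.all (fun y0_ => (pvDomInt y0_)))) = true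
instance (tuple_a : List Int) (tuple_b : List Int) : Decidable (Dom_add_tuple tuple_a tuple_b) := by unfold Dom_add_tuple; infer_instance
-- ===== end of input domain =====

-- B drops A's padding entirely: it folds each tuple's first two enumerated elements into a zero-initialised pair accumulator (objective: alternative).


-- ===== PORT A =====
-- helper change_one: list(tupl); append 0; tuple(...)
def change_one_pv (tupl : List Int) : List Int := tupl ++ [0]

-- helper change_two: list(tupl); loop appends 0 twice; tuple(...)
def change_two_pv (tupl : List Int) : List Int :=
  (PySem.List.pyRange 0 2 1).foldl (fun t _ => t ++ [(0 : Int)]) tupl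

def add_tuple (tuple_a : List Int) (tuple_b : List Int) : Int × Int :=
  let tuple_a := if tuple_a.length == 1 then change_one_pv tuple_a else tuple_a
  let tuple_b := if tuple_b.length == 1 then change_one_pv tuple_b else tuple_b
  let tuple_a := if tuple_a.length == 0 then change_two_pv tuple_a else tuple_a
  let tuple_b := if tuple_b.length == 0 then change_two_pv tuple_b else tuple_b
  -- f-building loop; after the padding above both lists have length ≥ 2, so
  -- tuple_a[i] / tuple_b[i] are always in range and .getD 0 is never taken
  let f := (PySem.List.pyRange 0 2 1).foldl
    (fun f i => f ++ [(PySem.List.pyGet? tuple_a i).getD 0 + (PySem.List.pyGet? tuple_b i).getD 0]) []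
  ((PySem.List.pyGet? f 0).getD 0, (PySem.List.pyGet? f 1).getD 0)

-- ===== PORT B =====
-- inner loop: for i, x in enumerate(t[:2]): sums[i] = sums[i] + x
def addContrib_pv (s : Int × Int) (t : List Int) : Int × Int :=
  (PySem.List.enumerate (PySem.List.slice t none (some 2)) 0).foldl
    (fun s ix => if ix.1 = 0 then (s.1 + ix.2, s.2) else (s.1, s.2 + ix.2)) s

def add_tuple_alt (tuple_a : List Int) (tuple_b : List Int) : Int × Int :=
  let sums : Int × Int := (0, 0)
  let sums := addContrib_pv sums tuple_a
  let sums := addContrib_pv sums tuple_b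
  sums

-- ===== PRECONDITION & SPEC =====
def Spec_add_tuple (tuple_a : List Int) (tuple_b : List Int) (out : Int × Int) : Prop := out = add_tuple_alt tuple_a tuple_b
instance (tuple_a : List Int) (tuple_b : List Int) (out : Int × Int) : Decidable (Spec_add_tuple tuple_a tuple_b out) := by unfold Spec_add_tuple; infer_instance

-- ===== CLAIM =====
def Claim_equal_add_tuple : Prop := ∀ (tuple_a : List Int) (tuple_b : List Int), Dom_add_tuple tuple_a tuple_b → Spec_add_tuple tuple_a tuple_b (add_tuple tuple_a tuple_b)

-- ===== LEMMAS AND PROOFS =====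
theorem pyRange_02 : PySem.List.pyRange 0 2 1 = [0, 1] := by decide

-- ===== VERDICT =====
theorem add_tuple_spec : Claim_equal_add_tuple := by
  intro tuple_a tuple_b _
  unfold Spec_add_tuple
  rcases tuple_a with _ | ⟨x, _ | ⟨y, ta⟩⟩ <;>
  rcases tuple_b with _ | ⟨u, _ | ⟨v, tb⟩⟩ <;>
    simp [add_tuple, add_tuple_alt, addContrib_pv, change_one_pv, change_two_pv,
      pyRange_02, PySem.List.pyGet?_zero_cons, PySem.List.slice,
      PySem.List.enumerate] <;>
    simp [show ((1:Int)) = ((1:Nat):Int) from rfl, PySem.List.pyGet?_natCast]
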